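-- pv_equiv track=rewrite | github.com/sagarparmar-netweb/demo-test | src/postprocessor.py | _prioritize_anatomic_codes
-- ===== SOURCE A (Python) =====
-- from typing import List, Dict, Set, Tuple
--
-- def _prioritize_anatomic_codes(codes: List[str]) -> List[str]:
--     """
--     Prioritize anatomically specific codes (M/N) over general symptom codes (R).
--
--     When coding symptoms is necessary, prefer:
--     - M codes (musculoskeletal) over R codes
--     - N codes (genitourinary) over R codes
--
--     This reorders codes to put specific codes first, but keeps R codes
--     if they provide unique information.
--     """
--     # Separate codes by priority
--     high_priority = []  # M, N, S, C, D, I, J, K codes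
--     medium_priority = []  # Other specific codes
--     low_priority = []  # R, Z codes (symptoms, encounters)
--
--     for code in codes:
--         if code.startswith(('M', 'N', 'S', 'C', 'D', 'I', 'J', 'K')):
--             high_priority.append(code)
--         elif code.startswith(('R', 'Z')):
--             low_priority.append(code)
--         else:
--             medium_priority.append(code)
--
--     # Return prioritized order
--     return high_priority + medium_priority + low_priority
-- ===== SOURCE B (Python) =====
-- def _prioritize_anatomic_codes(codes):
--     def priority(code):
--         if code.startswith(('M', 'N', 'S', 'C', 'D', 'I', 'J', 'K')):
--             return 0
--         if code.startswith(('R', 'Z')):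
--             return 2
--         return 1
--     return sorted(codes, key=priority)
-- ===== Notes on version B (the rewrite author's own statement) =====
-- stated objective: idiomatic
-- what changed: Replaces the three explicit priority buckets with a single stable sort by a 0/1/2 priority key; stability preserves the original relative order within each bucket.
import Mathlib
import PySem

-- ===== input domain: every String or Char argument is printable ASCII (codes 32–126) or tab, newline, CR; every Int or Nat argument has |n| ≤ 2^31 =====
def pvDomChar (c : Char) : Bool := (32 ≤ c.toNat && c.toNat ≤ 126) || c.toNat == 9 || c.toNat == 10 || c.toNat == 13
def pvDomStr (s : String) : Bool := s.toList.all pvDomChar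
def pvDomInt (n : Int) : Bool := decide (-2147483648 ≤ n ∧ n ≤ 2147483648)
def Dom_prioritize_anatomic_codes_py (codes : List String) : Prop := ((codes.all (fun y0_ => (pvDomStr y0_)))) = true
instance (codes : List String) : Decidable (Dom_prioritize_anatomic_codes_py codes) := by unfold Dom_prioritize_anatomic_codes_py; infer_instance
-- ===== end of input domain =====

-- B replaces A's three-bucket partition by one stable sort on a 0/1/2 priority key (idiomatic; same result).

-- ===== PORT A =====
-- code.startswith(('M','N','S','C','D','I','J','K'))
def pvHighA (code : String) : Bool :=
  PySem.Str.startswith code "M" || PySem.Str.startswith code "N" || PySem.Str.startswith code "S" ||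
  PySem.Str.startswith code "C" || PySem.Str.startswith code "D" || PySem.Str.startswith code "I" ||
  PySem.Str.startswith code "J" || PySem.Str.startswith code "K"

-- code.startswith(('R','Z'))
def pvLowA (code : String) : Bool :=
  PySem.Str.startswith code "R" || PySem.Str.startswith code "Z"

def prioritize_anatomic_codes_py (codes : List String) : List String :=
  let st := codes.foldl
    (fun (acc : List String × List String × List String) code =>
      if pvHighA code then (acc.1 ++ [code], acc.2.1, acc.2.2)
      else if pvLowA code then (acc.1, acc.2.1, acc.2.2 ++ [code])
      else (acc.1, acc.2.1 ++ [code], acc.2.2))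
    ([], [], [])
  st.1 ++ st.2.1 ++ st.2.2

-- ===== PORT B =====
-- B's 'priority' helper
def pvPriority (code : String) : Int :=
  if PySem.Str.startswith code "M" || PySem.Str.startswith code "N" || PySem.Str.startswith code "S" ||
     PySem.Str.startswith code "C" || PySem.Str.startswith code "D" || PySem.Str.startswith code "I" ||
     PySem.Str.startswith code "J" || PySem.Str.startswith code "K" then 0
  else if PySem.Str.startswith code "R" || PySem.Str.startswith code "Z" then 2
  else 1

def prioritize_anatomic_codes_py_alt (codes : List String) : List String :=
  PySem.List.sorted codes pvPriority

-- ===== PRECONDITION & SPEC =====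
def Spec_prioritize_anatomic_codes_py (codes : List String) (out : List String) : Prop := out = prioritize_anatomic_codes_py_alt codes
instance (codes : List String) (out : List String) : Decidable (Spec_prioritize_anatomic_codes_py codes out) := by unfold Spec_prioritize_anatomic_codes_py; infer_instance

-- ===== CLAIM (what is proved, stated in full; the proofs are below) =====
def Claim_equal_prioritize_anatomic_codes_py : Prop := ∀ (codes : List String), Dom_prioritize_anatomic_codes_py codes → Spec_prioritize_anatomic_codes_py codes (prioritize_anatomic_codes_py codes)

-- ===== LEMMAS AND PROOFS =====

lemma pvPriority_cases (c : String) : pvPriority c = 0 ∨ pvPriority c = 1 ∨ pvPriority c = 2 := by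
  unfold pvPriority; split_ifs <;> simp

-- A's loop appends each code to the bucket named by its priority: the final buckets are filters.
lemma portA_buckets (xs : List String) : ∀ (H M L : List String),
    xs.foldl
      (fun (acc : List String × List String × List String) code =>
        if pvHighA code then (acc.1 ++ [code], acc.2.1, acc.2.2)
        else if pvLowA code then (acc.1, acc.2.1, acc.2.2 ++ [code])
        else (acc.1, acc.2.1 ++ [code], acc.2.2))
      (H, M, L)
    = (H ++ xs.filter (fun c => pvPriority c == 0),
       M ++ xs.filter (fun c => pvPriority c == 1),
       L ++ xs.filter (fun c => pvPriority c == 2)) := by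
  induction xs with
  | nil => simp
  | cons x xs ih =>
    intro H M L
    by_cases hh : pvHighA x
    · have hp : pvPriority x = 0 := by
        unfold pvPriority; unfold pvHighA at hh
        simp only [Bool.or_eq_true] at hh ⊢
        split_ifs
        all_goals simp_all
      simp only [List.foldl_cons, hh, if_true, ih, List.filter_cons, hp]
      simp [List.append_assoc]
    · by_cases hl : pvLowA x
      · have hp : pvPriority x = 2 := by
          unfold pvPriority; unfold pvHighA at hh; unfold pvLowA at hl
          simp only [Bool.or_eq_true] at hh hl ⊢
          split_ifs
          all_goals simp_all
        simp only [List.foldl_cons, hh, hl, if_true, if_false, Bool.false_eq_true, ih,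
          List.filter_cons, hp]
        simp [List.append_assoc]
      · have hp : pvPriority x = 1 := by
          unfold pvPriority; unfold pvHighA at hh; unfold pvLowA at hl
          simp only [Bool.or_eq_true] at hh hl ⊢
          split_ifs
          all_goals simp_all
        simp only [List.foldl_cons, hh, hl, if_false, Bool.false_eq_true, ih,
          List.filter_cons, hp]
        simp [List.append_assoc]

-- insertBy passes over a prefix it does not go before
lemma insertBy_skip {α : Type} (before : α → α → Bool) (x : α) (L R : List α)
    (h : ∀ y ∈ L, before x y = false) :
    PySem.List.insertBy before x (L ++ R) = L ++ PySem.List.insertBy before x R := by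
  induction L with
  | nil => simp
  | cons a L ih =>
    have ha : before x a = false := h a (by simp)
    simp only [List.cons_append, PySem.List.insertBy, ha, Bool.false_eq_true, if_false]
    exact congrArg (a :: ·) (ih fun y hy => h y (by simp [hy]))

-- insertBy stops at the head when it goes before it (or the list is empty)
lemma insertBy_head {α : Type} (before : α → α → Bool) (x : α) (ys : List α)
    (h : ∀ y ∈ ys.head?, before x y = true) :
    PySem.List.insertBy before x ys = x :: ys := by
  cases ys with
  | nil => rfl
  | cons a ys => simp [PySem.List.insertBy, h a (by simp)]

-- The stable insertion fold keeps the list partitioned into the three priority buckets.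
lemma sorted_buckets (xs : List String) : ∀ (A B C : List String),
    (∀ a ∈ A, pvPriority a = 0) → (∀ b ∈ B, pvPriority b = 1) → (∀ c ∈ C, pvPriority c = 2) →
    xs.foldl (fun acc x => PySem.List.insertBy (fun a b => decide (pvPriority a < pvPriority b)) x acc)
        (A ++ (B ++ C))
    = (A ++ xs.filter (fun c => pvPriority c == 0)) ++
      ((B ++ xs.filter (fun c => pvPriority c == 1)) ++
       (C ++ xs.filter (fun c => pvPriority c == 2))) := by
  induction xs with
  | nil => simp
  | cons x xs ih =>
    intro A B C hA hB hC
    simp only [List.foldl_cons]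
    rcases pvPriority_cases x with hx | hx | hx
    · have h1 : PySem.List.insertBy (fun a b => decide (pvPriority a < pvPriority b)) x (A ++ (B ++ C))
          = (A ++ [x]) ++ (B ++ C) := by
        rw [insertBy_skip _ _ A (B ++ C) ?_]
        · rw [insertBy_head _ _ (B ++ C) ?_]
          · simp
          · intro y hy
            have hy' : y ∈ B ++ C := List.mem_of_mem_head? hy
            rcases List.mem_append.mp hy' with h | h
            · simp [hx, hB y h]
            · simp [hx, hC y h]
        · intro y hy; simp [hx, hA y hy]
      have hA' : ∀ a ∈ A ++ [x], pvPriority a = 0 := by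
        intro a ha
        rcases List.mem_append.mp ha with h | h
        · exact hA a h
        · simp_all
      rw [h1, ih (A ++ [x]) B C hA' hB hC]
      simp [hx, List.append_assoc]
    · have h1 : PySem.List.insertBy (fun a b => decide (pvPriority a < pvPriority b)) x (A ++ (B ++ C))
          = A ++ ((B ++ [x]) ++ C) := by
        rw [show A ++ (B ++ C) = (A ++ B) ++ C by simp]
        rw [insertBy_skip _ _ (A ++ B) C ?_]
        · rw [insertBy_head _ _ C ?_]
          · simp
          · intro y hy
            have hy' : y ∈ C := List.mem_of_mem_head? hy
            simp [hx, hC y hy']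
        · intro y hy
          rcases List.mem_append.mp hy with h | h
          · simp [hx, hA y h]
          · simp [hx, hB y h]
      have hB' : ∀ b ∈ B ++ [x], pvPriority b = 1 := by
        intro b hb
        rcases List.mem_append.mp hb with h | h
        · exact hB b h
        · simp_all
      rw [h1, ih A (B ++ [x]) C hA hB' hC]
      simp [hx, List.append_assoc]
    · have h1 : PySem.List.insertBy (fun a b => decide (pvPriority a < pvPriority b)) x (A ++ (B ++ C))
          = A ++ (B ++ (C ++ [x])) := by
        have hall : ∀ y ∈ A ++ (B ++ C),
            (fun a b => decide (pvPriority a < pvPriority b)) x y = false := by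
          intro y hy
          rcases List.mem_append.mp hy with h | h
          · simp [hx, hA y h]
          · rcases List.mem_append.mp h with h' | h'
            · simp [hx, hB y h']
            · simp [hx, hC y h']
        rw [PySem.List.insertBy_of_forall_not_before _ _ _ hall]
        simp
      have hC' : ∀ c ∈ C ++ [x], pvPriority c = 2 := by
        intro c hc
        rcases List.mem_append.mp hc with h | h
        · exact hC c h
        · simp_all
      rw [h1, ih A B (C ++ [x]) hA hB hC']
      simp [hx, List.append_assoc]

-- ===== VERDICT (by name: the statement is the Claim_ definition above) =====
theorem prioritize_anatomic_codes_py_spec : Claim_equal_prioritize_anatomic_codes_py := by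
  intro codes _
  show prioritize_anatomic_codes_py codes = prioritize_anatomic_codes_py_alt codes
  unfold prioritize_anatomic_codes_py prioritize_anatomic_codes_py_alt
  rw [PySem.List.sorted_eq_foldl_insertBy]
  have hb := sorted_buckets codes [] [] [] (by simp) (by simp) (by simp)
  simp only [List.nil_append] at hb
  rw [hb, portA_buckets codes [] [] []]
  simp
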